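-- pv_equiv track=rewrite | github.com/AbhishekRReddy/DSA-in-Python | Greedy_Algorithms/Shop_In_a_Candy_Store.py | candyStore
-- ===== SOURCE A (Python) =====
-- def candyStore(candies,N,K):
--     # code here
--     candies.sort()
--     for_max = candies[:]
--     min = 0
--     max = 0
--     while len(for_max)>0:
--         min += for_max.pop(0)
--         for _ in range(K):
--             if len(for_max)>0:
--                 for_max.pop()
--     while len(candies)>0:
--         max += candies.pop()
--         for _ in range(K):
--             if len(candies)>0:
--                 candies.pop(0)
--     return min,max
-- ===== SOURCE B (Python) =====
-- def candyStore(candies, N, K):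
--     s = sorted(candies)
--     n = len(s)
--     k = K if K > 0 else 0
--     t = (n + k) // (k + 1)  # number of candies actually paid for
--     return sum(s[:t]), sum(s[n - t:])
-- ===== Notes on version B (the rewrite author's own statement) =====
-- stated objective: faster
-- what changed: Replaces the two quadratic pop(0)/pop() simulation loops by a closed form: after one sort, exactly t = ceil(n/(K+1)) candies are paid for, so min is the sum of the first t and max the sum of the last t sorted elements.
import Mathlib
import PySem

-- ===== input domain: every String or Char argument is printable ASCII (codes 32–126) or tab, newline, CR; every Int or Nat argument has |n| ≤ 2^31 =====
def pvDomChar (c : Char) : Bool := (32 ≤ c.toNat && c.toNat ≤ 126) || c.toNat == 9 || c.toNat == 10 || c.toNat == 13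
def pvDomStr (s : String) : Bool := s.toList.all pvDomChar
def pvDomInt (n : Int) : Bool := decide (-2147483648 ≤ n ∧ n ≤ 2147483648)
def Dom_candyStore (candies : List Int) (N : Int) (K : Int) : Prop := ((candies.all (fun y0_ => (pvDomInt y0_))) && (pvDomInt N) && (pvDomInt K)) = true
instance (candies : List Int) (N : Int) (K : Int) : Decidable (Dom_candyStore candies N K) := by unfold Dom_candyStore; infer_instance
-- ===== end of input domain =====

-- B replaces A's quadratic pop(0)/pop() simulation by a closed form (sum of the first /
-- last ceil(n/(K+1)) sorted elements); equivalence is about the RETURN value only —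
-- A sorts and empties its `candies` argument in place, B does not mutate it.

-- ===== PORT A =====
-- `for _ in range(K): if len(l)>0: l.pop()`  (K.toNat guarded back-pops)
def popBackK (l : List Int) (k : Nat) : List Int :=
  match k with
  | 0 => l
  | k + 1 => popBackK (if l.length > 0 then l.dropLast else l) k

-- `for _ in range(K): if len(l)>0: l.pop(0)`  (K.toNat guarded front-pops)
def popFrontK (l : List Int) (k : Nat) : List Int :=
  match k with
  | 0 => l
  | k + 1 => popFrontK (if l.length > 0 then l.tail else l) k

theorem popBackK_length_le (l : List Int) (k : Nat) : (popBackK l k).length ≤ l.length := by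
  induction k generalizing l with
  | zero => simp [popBackK]
  | succ k ih =>
    simp only [popBackK]
    refine le_trans (ih _) ?_
    split <;> simp [List.length_dropLast]

theorem popFrontK_length_le (l : List Int) (k : Nat) : (popFrontK l k).length ≤ l.length := by
  induction k generalizing l with
  | zero => simp [popFrontK]
  | succ k ih =>
    simp only [popFrontK]
    refine le_trans (ih _) ?_
    split <;> simp [List.length_tail]

-- `while len(for_max)>0: min += for_max.pop(0); <K guarded back-pops>`
def minLoop (l : List Int) (acc : Int) (k : Nat) : Int :=
  match l with
  | [] => acc
  | x :: rest => minLoop (popBackK rest k) (acc + x) k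
termination_by l.length
decreasing_by
  exact Nat.lt_succ_of_le (popBackK_length_le rest k)

-- `while len(candies)>0: max += candies.pop(); <K guarded front-pops>`
def maxLoop (l : List Int) (acc : Int) (k : Nat) : Int :=
  match l with
  | [] => acc
  | x :: rest =>
      maxLoop (popFrontK (x :: rest).dropLast k) (acc + ((x :: rest).getLast?.getD 0)) k
termination_by l.length
decreasing_by
  calc (popFrontK (x :: rest).dropLast k).length
      ≤ (x :: rest).dropLast.length := popFrontK_length_le _ k
    _ < (x :: rest).length := by simp [List.length_dropLast]

def candyStore (candies : List Int) (N : Int) (K : Int) : Int × Int :=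
  let s := PySem.List.sorted candies (fun x => x) false
  (minLoop s 0 K.toNat, maxLoop s 0 K.toNat)

-- ===== PORT B =====
def candyStore_alt (candies : List Int) (N : Int) (K : Int) : Int × Int :=
  let s := PySem.List.sorted candies (fun x => x) false
  let n : Int := s.length
  let k : Int := if K > 0 then K else 0
  let t : Int := PySem.Int.floordiv (n + k) (k + 1)
  ((PySem.List.slice s none (some t)).sum, (PySem.List.slice s (some (n - t)) none).sum)

-- ===== PRECONDITION & SPEC =====
def Spec_candyStore (candies : List Int) (N : Int) (K : Int) (out : Int × Int) : Prop := out = candyStore_alt candies N K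
instance (candies : List Int) (N : Int) (K : Int) (out : Int × Int) : Decidable (Spec_candyStore candies N K out) := by unfold Spec_candyStore; infer_instance

-- ===== CLAIM (what is proved, stated in full; the proofs are below) =====
def Claim_equal_candyStore : Prop := ∀ (candies : List Int) (N : Int) (K : Int), Dom_candyStore candies N K → Spec_candyStore candies N K (candyStore candies N K)

-- ===== LEMMAS AND PROOFS =====

-- number of elements actually paid for out of n, with k freebies per purchase
def tn (n k : Nat) : Nat := (n + k) / (k + 1)

theorem tn_le (n k : Nat) : tn n k ≤ n := by
  have h : n + k < (n + 1) * (k + 1) := by nlinarith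
  have h2 : (n + k) / (k + 1) < n + 1 := (Nat.div_lt_iff_lt_mul (by omega)).mpr h
  unfold tn; omega

theorem tn_succ (m k : Nat) : tn (m + 1) k = tn (m - k) k + 1 := by
  unfold tn
  have h1 : (m + 1 + k) = m + (k + 1) := by omega
  rw [h1, Nat.add_div_right _ (Nat.succ_pos k)]
  by_cases h : k ≤ m
  · have hm : m - k + k = m := by omega
    rw [hm]
  · have h0 : m - k = 0 := by omega
    rw [h0, Nat.zero_add, Nat.div_eq_of_lt (by omega), Nat.div_eq_of_lt (by omega)]

theorem popBackK_eq (l : List Int) (k : Nat) : popBackK l k = l.take (l.length - k) := by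
  induction k generalizing l with
  | zero => simp [popBackK]
  | succ k ih =>
    simp only [popBackK]
    rcases l.eq_nil_or_concat with rfl | ⟨ys, y, rfl⟩
    · rw [if_neg (by simp), ih]; simp
    · simp only [List.concat_eq_append]
      have hpos : (ys ++ [y]).length > 0 := by simp
      rw [if_pos hpos, List.dropLast_concat, ih]
      have h1 : ys.length - k = (ys ++ [y]).length - (k + 1) := by simp
      rw [h1, List.take_append_of_le_length (by simp)]

theorem popFrontK_eq (l : List Int) (k : Nat) : popFrontK l k = l.drop k := by
  induction k generalizing l with
  | zero => simp [popFrontK]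
  | succ k ih =>
    simp only [popFrontK]
    cases l with
    | nil => simp [ih]
    | cons x rest => simpa using ih rest

theorem minLoop_eq (l : List Int) (acc : Int) (k : Nat) :
    minLoop l acc k = acc + (l.take (tn l.length k)).sum := by
  induction hn : l.length using Nat.strong_induction_on generalizing l acc with
  | _ n ih =>
    cases l with
    | nil => simp [minLoop, tn]
    | cons x rest =>
      subst hn
      rw [minLoop, popBackK_eq,
        ih ((rest.take (rest.length - k)).length)
          (by simp only [List.length_take, List.length_cons]; omega) _ (acc + x) rfl]
      have hlen : (rest.take (rest.length - k)).length = rest.length - k := by simp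
      rw [hlen, List.take_take]
      have hmin : min (tn (rest.length - k) k) (rest.length - k) = tn (rest.length - k) k :=
        min_eq_left (tn_le _ _)
      rw [hmin]
      simp only [List.length_cons, tn_succ rest.length k, List.take_succ_cons, List.sum_cons]
      ring

theorem maxLoop_eq_minLoop_reverse (l : List Int) (acc : Int) (k : Nat) :
    maxLoop l acc k = minLoop l.reverse acc k := by
  induction hn : l.length using Nat.strong_induction_on generalizing l acc with
  | _ n ih =>
    rcases l.eq_nil_or_concat with rfl | ⟨ys, y, rfl⟩
    · simp [maxLoop, minLoop]
    · subst hn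
      simp only [List.concat_eq_append]
      cases hys : ys ++ [y] with
      | nil => simp at hys
      | cons x rest =>
        rw [maxLoop]
        rw [← hys]
        have h1 : (ys ++ [y]).dropLast = ys := List.dropLast_concat ..
        have h2 : (ys ++ [y]).getLast?.getD 0 = y := by simp
        have h3 : (ys ++ [y]).reverse = y :: ys.reverse := by simp
        rw [h1, h2, h3, minLoop, popFrontK_eq, popBackK_eq,
          ih ((ys.drop k).length)
            (by simp only [List.length_drop, List.concat_eq_append, List.length_append, List.length_cons]; omega)
            _ (acc + y) rfl]
        congr 1
        rw [List.reverse_drop]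
        simp

theorem maxLoop_eq (l : List Int) (acc : Int) (k : Nat) :
    maxLoop l acc k = acc + (l.drop (l.length - tn l.length k)).sum := by
  rw [maxLoop_eq_minLoop_reverse, minLoop_eq]
  have ht : tn l.length k ≤ l.length := tn_le _ _
  have h : l.reverse.take (tn l.reverse.length k) = (l.drop (l.length - tn l.length k)).reverse := by
    rw [List.reverse_drop, List.length_reverse]
    congr 1
    omega
  rw [h, List.sum_reverse]

theorem toNat_eq_if (K : Int) : ((K.toNat : Int)) = if K > 0 then K else 0 := by
  split <;> omega

-- ===== VERDICT (by name: the statement is the Claim_ definition above) =====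
theorem candyStore_spec : Claim_equal_candyStore := by
  intro candies N K _
  unfold Spec_candyStore candyStore candyStore_alt
  simp only []
  set s := PySem.List.sorted candies (fun x => x) false with hs
  have hk : (if K > 0 then K else 0) = ((K.toNat : Nat) : Int) := (toNat_eq_if K).symm
  rw [hk]
  have hnk : ((s.length : Int) + (K.toNat : Int)) = ((s.length + K.toNat : Nat) : Int) := by push_cast; ring
  have hk1 : ((K.toNat : Int) + 1) = ((K.toNat + 1 : Nat) : Int) := by push_cast; ring
  rw [hnk, hk1, PySem.Int.floordiv_natCast]
  have htn : (s.length + K.toNat) / (K.toNat + 1) = tn s.length K.toNat := rfl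
  rw [htn]
  have ht : tn s.length K.toNat ≤ s.length := tn_le _ _
  have hsub : ((s.length : Int) - ((tn s.length K.toNat : Nat) : Int))
      = ((s.length - tn s.length K.toNat : Nat) : Int) := by
    rw [Int.ofNat_sub ht]
  rw [hsub, PySem.List.slice_to_natCast, PySem.List.slice_from_natCast,
    minLoop_eq, maxLoop_eq]
  simp
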